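-- pv_equiv track=rewrite | github.com/shaikhaltamash69/isl-translator | main.py | simple_isl_reorder
-- ===== SOURCE A (Python) =====
-- def simple_isl_reorder(words):
--     """
--     Reorders English words to follow ISL (Indian Sign Language) grammar structure.
--     ISL follows: TIME + TOPIC + SUBJECT + OBJECT + VERB + QUESTION/EMOTION
--     """
--     if not words or len(words) <= 2:
--         return words
--
--     # Initialize categories
--     time_words = []
--     topic_words = []
--     subject_words = []
--     object_words = []
--     verb_words = []
--     question_words = []
--     greeting_words = []
--     location_words = []
--     remaining_words = []
--
--     # Define word categories for ISL
--     time_indicators = {'today', 'tomorrow', 'yesterday', 'now', 'then', 'when', 'time',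
--                       'morning', 'evening', 'night', 'day', 'week', 'month', 'year'}
--
--     greetings = {'hello', 'hi', 'welcome', 'good', 'bye', 'thanks', 'thank'}
--
--     question_indicators = {'what', 'where', 'when', 'why', 'how', 'who', 'which', 'can', 'do'}
--
--     location_indicators = {'here', 'there', 'where', 'place', 'home', 'school', 'office'}
--
--     # Common verbs - action words typically come at the end in ISL
--     common_verbs = {'help', 'go', 'come', 'eat', 'drink', 'work', 'play', 'learn',
--                    'teach', 'read', 'write', 'see', 'hear', 'speak', 'sign'}
--
--     # Topic/subject indicators
--     topic_indicators = {'we', 'our', 'sign', 'engine', 'system', 'app'}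
--
--     # Process each word
--     for i, word in enumerate(words):
--         word_lower = word.lower()
--
--         # Categorize words based on ISL grammar
--         if word_lower in greetings:
--             greeting_words.append(word)
--         elif word_lower in time_indicators:
--             time_words.append(word)
--         elif word_lower in question_indicators:
--             question_words.append(word)
--         elif word_lower in location_indicators:
--             location_words.append(word)
--         elif word_lower in common_verbs:
--             verb_words.append(word)
--         elif word_lower in topic_indicators or word_lower in {'deaf', 'people', 'person'}:
--             if word_lower in {'we', 'our', 'i', 'you'}:
--                 subject_words.append(word)
--             else:
--                 topic_words.append(word)
--         else:
--             # Determine context-based placement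
--             if i < len(words) // 2:  # First half - likely topic/subject
--                 if word_lower in {'deaf', 'people', 'person', 'student', 'teacher'}:
--                     object_words.append(word)
--                 else:
--                     topic_words.append(word)
--             else:  # Second half - likely object/remaining
--                 remaining_words.append(word)
--
--     # ISL sentence structure: GREETING + TIME + TOPIC + SUBJECT + OBJECT + LOCATION + VERB + QUESTION
--     reordered = []
--
--     # Add greetings first (very important in ISL)
--     reordered.extend(greeting_words)
--
--     # Add time references
--     reordered.extend(time_words)
--
--     # Add topic/theme of conversation
--     reordered.extend(topic_words)
--
--     # Add subject (who is doing)
--     reordered.extend(subject_words)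
--
--     # Add object (who/what is being acted upon)
--     reordered.extend(object_words)
--
--     # Add location
--     reordered.extend(location_words)
--
--     # Add remaining words
--     reordered.extend(remaining_words)
--
--     # Add verbs at the end (ISL is typically verb-final)
--     reordered.extend(verb_words)
--
--     # Add questions/emotions at the very end
--     reordered.extend(question_words)
--
--     return reordered if reordered else words
-- ===== SOURCE B (Python) =====
-- def simple_isl_reorder(words):
--     if not words or len(words) <= 2:
--         return words
--     n = len(words)
--
--     def rank(i, w):
--         wl = w.lower()
--         if wl in {'hello', 'hi', 'welcome', 'good', 'bye', 'thanks', 'thank'}: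
--             return 0
--         if wl in {'today', 'tomorrow', 'yesterday', 'now', 'then', 'when', 'time',
--                   'morning', 'evening', 'night', 'day', 'week', 'month', 'year'}:
--             return 1
--         if wl in {'what', 'where', 'when', 'why', 'how', 'who', 'which', 'can', 'do'}:
--             return 8
--         if wl in {'here', 'there', 'where', 'place', 'home', 'school', 'office'}:
--             return 5
--         if wl in {'help', 'go', 'come', 'eat', 'drink', 'work', 'play', 'learn',
--                   'teach', 'read', 'write', 'see', 'hear', 'speak', 'sign'}:
--             return 7
--         if wl in {'we', 'our', 'sign', 'engine', 'system', 'app'} or wl in {'deaf', 'people', 'person'}: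
--             return 3 if wl in {'we', 'our', 'i', 'you'} else 2
--         if i < n // 2:
--             return 4 if wl in {'deaf', 'people', 'person', 'student', 'teacher'} else 2
--         return 6
--
--     return [w for r in range(9) for i, w in enumerate(words) if rank(i, w) == r]
-- ===== Notes on version B (the rewrite author's own statement) =====
-- stated objective: simpler
-- what changed: Replaces the nine named accumulator lists and their eight-way concatenation with a single integer rank function and one comprehension that emits, per rank 0..8, the words of that rank in original order.
import Mathlib
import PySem

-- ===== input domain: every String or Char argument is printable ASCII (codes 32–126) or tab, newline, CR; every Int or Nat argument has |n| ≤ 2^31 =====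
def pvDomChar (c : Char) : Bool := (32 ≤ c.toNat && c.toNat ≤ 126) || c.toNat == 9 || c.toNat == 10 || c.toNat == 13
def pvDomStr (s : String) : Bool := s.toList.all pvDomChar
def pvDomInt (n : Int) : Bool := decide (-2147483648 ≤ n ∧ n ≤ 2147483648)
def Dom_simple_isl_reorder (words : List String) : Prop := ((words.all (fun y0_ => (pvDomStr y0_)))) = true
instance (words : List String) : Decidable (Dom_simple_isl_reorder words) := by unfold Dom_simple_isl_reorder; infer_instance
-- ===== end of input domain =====

-- B replaces A's nine accumulator lists and eight concatenations by a rank function and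
-- one per-rank comprehension (objective: simpler).

-- Shared word-set data (the literal sets from the Python source)
def islGreetings : List String := ["hello", "hi", "welcome", "good", "bye", "thanks", "thank"]
def islTime : List String := ["today", "tomorrow", "yesterday", "now", "then", "when", "time",
  "morning", "evening", "night", "day", "week", "month", "year"]
def islQuestion : List String := ["what", "where", "when", "why", "how", "who", "which", "can", "do"]
def islLocation : List String := ["here", "there", "where", "place", "home", "school", "office"]
def islVerbs : List String := ["help", "go", "come", "eat", "drink", "work", "play", "learn",
  "teach", "read", "write", "see", "hear", "speak", "sign"]
def islTopic : List String := ["we", "our", "sign", "engine", "system", "app"]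
def islDeafSet : List String := ["deaf", "people", "person"]
def islSubjPron : List String := ["we", "our", "i", "you"]
def islObjFirstHalf : List String := ["deaf", "people", "person", "student", "teacher"]

-- ===== PORT A =====
structure IslSt where
  time_words : List String
  topic_words : List String
  subject_words : List String
  object_words : List String
  verb_words : List String
  question_words : List String
  greeting_words : List String
  location_words : List String
  remaining_words : List String
  deriving Repr, DecidableEq

-- word_lower is computed once per word and passed to the categorising core
def islStepACore (n : Int) (s : IslSt) (i : Int) (word : String) (wl : String) : IslSt :=
  if islGreetings.contains wl then { s with greeting_words := s.greeting_words ++ [word] }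
  else if islTime.contains wl then { s with time_words := s.time_words ++ [word] }
  else if islQuestion.contains wl then { s with question_words := s.question_words ++ [word] }
  else if islLocation.contains wl then { s with location_words := s.location_words ++ [word] }
  else if islVerbs.contains wl then { s with verb_words := s.verb_words ++ [word] }
  else if islTopic.contains wl || islDeafSet.contains wl then
    if islSubjPron.contains wl then { s with subject_words := s.subject_words ++ [word] }
    else { s with topic_words := s.topic_words ++ [word] }
  else if i < PySem.Int.floordiv n 2 then
    if islObjFirstHalf.contains wl then { s with object_words := s.object_words ++ [word] }
    else { s with topic_words := s.topic_words ++ [word] }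
  else { s with remaining_words := s.remaining_words ++ [word] }

def islStepA (n : Int) (s : IslSt) (p : Int × String) : IslSt :=
  islStepACore n s p.1 p.2 (PySem.Str.lower p.2)

def simple_isl_reorder (words : List String) : List String :=
  if words = [] ∨ words.length ≤ 2 then words
  else
    let n : Int := words.length
    let f := (PySem.List.enumerate words).foldl (islStepA n) ⟨[], [], [], [], [], [], [], [], []⟩
    let reordered := f.greeting_words ++ f.time_words ++ f.topic_words ++ f.subject_words ++
      f.object_words ++ f.location_words ++ f.remaining_words ++ f.verb_words ++ f.question_words
    if reordered = [] then words else reordered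

-- ===== PORT B =====
def islRankCore (n i : Int) (wl : String) : Int :=
  if islGreetings.contains wl then 0
  else if islTime.contains wl then 1
  else if islQuestion.contains wl then 8
  else if islLocation.contains wl then 5
  else if islVerbs.contains wl then 7
  else if islTopic.contains wl || islDeafSet.contains wl then
    (if islSubjPron.contains wl then 3 else 2)
  else if i < PySem.Int.floordiv n 2 then
    (if islObjFirstHalf.contains wl then 4 else 2)
  else 6

def islRank (n i : Int) (w : String) : Int := islRankCore n i (PySem.Str.lower w)

def simple_isl_reorder_alt (words : List String) : List String :=
  if words = [] ∨ words.length ≤ 2 then words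
  else
    let n : Int := words.length
    (PySem.List.pyRange 0 9 1).flatMap (fun r =>
      ((PySem.List.enumerate words).filter (fun p => islRank n p.1 p.2 == r)).map (·.2))

-- ===== PRECONDITION & SPEC =====
def Spec_simple_isl_reorder (words : List String) (out : List String) : Prop := out = simple_isl_reorder_alt words
instance (words : List String) (out : List String) : Decidable (Spec_simple_isl_reorder words out) := by unfold Spec_simple_isl_reorder; infer_instance

-- ===== CLAIM (what is proved, stated in full; the proofs are below) =====
def Claim_equal_simple_isl_reorder : Prop := ∀ (words : List String), Dom_simple_isl_reorder words → Spec_simple_isl_reorder words (simple_isl_reorder words)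

-- ===== LEMMAS AND PROOFS =====

def islSeg (n : Int) (l : List (Int × String)) (r : Int) : List String :=
  (l.filter (fun p => islRank n p.1 p.2 == r)).map (·.2)

theorem islStepACore_eq (n : Int) (s : IslSt) (i : Int) (word wl : String) :
    islStepACore n s i word wl =
      ⟨(if islRankCore n i wl == 1 then s.time_words ++ [word] else s.time_words),
       (if islRankCore n i wl == 2 then s.topic_words ++ [word] else s.topic_words),
       (if islRankCore n i wl == 3 then s.subject_words ++ [word] else s.subject_words),
       (if islRankCore n i wl == 4 then s.object_words ++ [word] else s.object_words),
       (if islRankCore n i wl == 7 then s.verb_words ++ [word] else s.verb_words),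
       (if islRankCore n i wl == 8 then s.question_words ++ [word] else s.question_words),
       (if islRankCore n i wl == 0 then s.greeting_words ++ [word] else s.greeting_words),
       (if islRankCore n i wl == 5 then s.location_words ++ [word] else s.location_words),
       (if islRankCore n i wl == 6 then s.remaining_words ++ [word] else s.remaining_words)⟩ := by
  unfold islStepACore islRankCore
  by_cases h1 : wl ∈ islGreetings
  case pos => simp [h1]
  by_cases h2 : wl ∈ islTime
  case pos => simp [h1, h2]
  by_cases h3 : wl ∈ islQuestion
  case pos => simp [h1, h2, h3]
  by_cases h4 : wl ∈ islLocation
  case pos => simp [h1, h2, h3, h4]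
  by_cases h5 : wl ∈ islVerbs
  case pos => simp [h1, h2, h3, h4, h5]
  by_cases h6 : wl ∈ islTopic ∨ wl ∈ islDeafSet
  case pos =>
    by_cases h7 : wl ∈ islSubjPron
    case pos => simp [h1, h2, h3, h4, h5, h6, h7]
    case neg => simp [h1, h2, h3, h4, h5, h6, h7]
  rw [PySem.Int.floordiv_eq_ediv_of_pos (by omega : (0:Int) < 2)]
  by_cases h8 : i < n / 2
  case pos =>
    by_cases h9 : wl ∈ islObjFirstHalf
    case pos => simp_all
    case neg => simp_all
  case neg => simp only [if_neg h8]; simp [h1, h2, h3, h4, h5, h6]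

theorem islStepA_eq (n : Int) (s : IslSt) (p : Int × String) :
    islStepA n s p =
      ⟨(if islRank n p.1 p.2 == 1 then s.time_words ++ [p.2] else s.time_words),
       (if islRank n p.1 p.2 == 2 then s.topic_words ++ [p.2] else s.topic_words),
       (if islRank n p.1 p.2 == 3 then s.subject_words ++ [p.2] else s.subject_words),
       (if islRank n p.1 p.2 == 4 then s.object_words ++ [p.2] else s.object_words),
       (if islRank n p.1 p.2 == 7 then s.verb_words ++ [p.2] else s.verb_words),
       (if islRank n p.1 p.2 == 8 then s.question_words ++ [p.2] else s.question_words),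
       (if islRank n p.1 p.2 == 0 then s.greeting_words ++ [p.2] else s.greeting_words),
       (if islRank n p.1 p.2 == 5 then s.location_words ++ [p.2] else s.location_words),
       (if islRank n p.1 p.2 == 6 then s.remaining_words ++ [p.2] else s.remaining_words)⟩ := by
  unfold islStepA islRank
  exact islStepACore_eq n s p.1 p.2 (PySem.Str.lower p.2)

theorem isl_comp (b : Bool) (f : List String) (w : String) (t : List String) :
    (if b then f ++ [w] else f) ++ t = f ++ (if b then w :: t else t) := by
  cases b <;> simp

theorem islFold_eq (n : Int) (l : List (Int × String)) (s : IslSt) :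
    l.foldl (islStepA n) s =
      ⟨s.time_words ++ islSeg n l 1, s.topic_words ++ islSeg n l 2,
       s.subject_words ++ islSeg n l 3, s.object_words ++ islSeg n l 4,
       s.verb_words ++ islSeg n l 7, s.question_words ++ islSeg n l 8,
       s.greeting_words ++ islSeg n l 0, s.location_words ++ islSeg n l 5,
       s.remaining_words ++ islSeg n l 6⟩ := by
  induction l generalizing s with
  | nil => simp [islSeg]
  | cons p l ih =>
    rw [List.foldl_cons, ih, islStepA_eq]
    have hseg : ∀ r : Int, islSeg n (p :: l) r =
        if (islRank n p.1 p.2 == r) then p.2 :: islSeg n l r else islSeg n l r := by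
      intro r
      simp only [islSeg, List.filter_cons]
      by_cases h : (islRank n p.1 p.2 == r) = true <;> simp [h]
    simp only [hseg]
    simp only [IslSt.mk.injEq]
    exact ⟨isl_comp _ _ _ _, isl_comp _ _ _ _, isl_comp _ _ _ _, isl_comp _ _ _ _,
           isl_comp _ _ _ _, isl_comp _ _ _ _, isl_comp _ _ _ _, isl_comp _ _ _ _,
           isl_comp _ _ _ _⟩

theorem islRank_range (n i : Int) (w : String) :
    islRank n i w = 0 ∨ islRank n i w = 1 ∨ islRank n i w = 2 ∨ islRank n i w = 3 ∨
    islRank n i w = 4 ∨ islRank n i w = 5 ∨ islRank n i w = 6 ∨ islRank n i w = 7 ∨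
    islRank n i w = 8 := by
  unfold islRank islRankCore
  split_ifs <;> simp

theorem islFlat_ne_nil (n : Int) (w : String) (ws : List String) :
    (PySem.List.pyRange 0 9 1).flatMap (fun r =>
      islSeg n (PySem.List.enumerate (w :: ws)) r) ≠ [] := by
  intro h
  have hmem : w ∈ (PySem.List.pyRange 0 9 1).flatMap (fun r =>
      islSeg n (PySem.List.enumerate (w :: ws)) r) := by
    rw [List.mem_flatMap]
    refine ⟨islRank n 0 w, ?_, ?_⟩
    · rw [PySem.List.mem_pyRange_one]
      rcases islRank_range n 0 w with h|h|h|h|h|h|h|h|h <;> omega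
    · refine List.mem_map.mpr ⟨((0 : Int), w), List.mem_filter.mpr ⟨?_, ?_⟩, rfl⟩
      · rw [PySem.List.enumerate_cons]; exact List.mem_cons_self
      · exact beq_self_eq_true (islRank n 0 w)
  rw [h] at hmem
  exact (List.not_mem_nil) hmem

-- ===== VERDICT (by name: the statement is the Claim_ definition above) =====
theorem simple_isl_reorder_spec : Claim_equal_simple_isl_reorder := by
  intro words _
  unfold Spec_simple_isl_reorder simple_isl_reorder simple_isl_reorder_alt
  by_cases hg : words = [] ∨ words.length ≤ 2
  · simp [hg]
  · rcases words with _ | ⟨w, ws⟩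
    · exact absurd (Or.inl rfl) hg
    simp only [hg, if_false]
    rw [islFold_eq]
    have hflat : (PySem.List.pyRange 0 9 1).flatMap (fun r =>
        islSeg (((w :: ws).length : Int)) (PySem.List.enumerate (w :: ws)) r) =
        islSeg (((w :: ws).length : Int)) (PySem.List.enumerate (w :: ws)) 0 ++
        islSeg (((w :: ws).length : Int)) (PySem.List.enumerate (w :: ws)) 1 ++
        islSeg (((w :: ws).length : Int)) (PySem.List.enumerate (w :: ws)) 2 ++
        islSeg (((w :: ws).length : Int)) (PySem.List.enumerate (w :: ws)) 3 ++
        islSeg (((w :: ws).length : Int)) (PySem.List.enumerate (w :: ws)) 4 ++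
        islSeg (((w :: ws).length : Int)) (PySem.List.enumerate (w :: ws)) 5 ++
        islSeg (((w :: ws).length : Int)) (PySem.List.enumerate (w :: ws)) 6 ++
        islSeg (((w :: ws).length : Int)) (PySem.List.enumerate (w :: ws)) 7 ++
        islSeg (((w :: ws).length : Int)) (PySem.List.enumerate (w :: ws)) 8 := by
      have h9 : PySem.List.pyRange 0 9 1 = [0,1,2,3,4,5,6,7,8] := by decide
      rw [h9]
      simp [List.flatMap]
    have hne := islFlat_ne_nil (((w :: ws).length : Int)) w ws
    rw [hflat] at hne
    simp only [List.nil_append, islSeg] at hflat hne ⊢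
    rw [if_neg hne, hflat]
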